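-- pv_equiv track=rewrite | github.com/asthyeon/Algorithm | 백준/Gold/19940. 피자 오븐/피자 오븐.py | bfs
-- ===== SOURCE A (Python) =====
-- from collections import deque
--
-- buttons = [60, 10, -10, 1, -1]
--
-- def bfs(N):
--     # 60분 초과시 미리 누르기
--     q = deque([(0, N // 60, 0, 0, 0, 0)])
--     N %= 60
--     used = [0] * 61
--
--     while q:
--         time, ADDH, ADDT, MINT, ADDO, MINO = q.popleft()
--
--         # 설정 시간일 경우 종료
--         if time == N:
--             return ADDH, ADDT, MINT, ADDO, MINO
--
--         # 중복 처리
--         if not used[time]: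
--             used[time] = 1
--             # 버튼 누르기(사전순)
--             for button in range(4, -1, -1):
--                 new = time + buttons[button]
--
--                 # 0 미만 초기화
--                 new = max(new, 0)
--                 # 60분 초과는 60으로 초기화
--                 new = min(new, 60)
--
--                 # 버튼 횟수 증가
--                 cnts = [ADDH, ADDT, MINT, ADDO, MINO]
--                 cnts[button] += 1
--                 q.append((new, cnts[0], cnts[1], cnts[2], cnts[3], cnts[4]))
-- ===== SOURCE B (Python) =====
-- def bfs(N):
--     # Closed form: reach r = N%60 either by +10/+1 presses up from 0,
--     # or by one +60 press (clamped to 60) and -10/-1 presses down; pick the cheaper (tie -> up).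
--     h, r = divmod(N, 60)
--     tt, o = divmod(r, 10)
--     up = (tt, 0, o, 0) if o <= 5 else (tt + 1, 0, 0, 10 - o)
--     mt, p = divmod(60 - r, 10)
--     down = (0, mt, 0, p) if p <= 5 else (0, mt + 1, 10 - p, 0)
--     if sum(up) <= 1 + sum(down):
--         return (h,) + up
--     return (h + 1,) + down
-- ===== Notes on version B (the rewrite author's own statement) =====
-- stated objective: simpler
-- what changed: Replaces the BFS over oven-display states (deque, visited array, clamped button moves) with a closed-form choice between two candidate press sequences: climbing up from an empty display via tens and ones (possibly overshooting to the next ten and stepping back), or pressing the hour button once (clamped at the top) and stepping down via tens and ones; the cheaper sequence wins, ties going to the climbing one.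
import Mathlib
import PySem

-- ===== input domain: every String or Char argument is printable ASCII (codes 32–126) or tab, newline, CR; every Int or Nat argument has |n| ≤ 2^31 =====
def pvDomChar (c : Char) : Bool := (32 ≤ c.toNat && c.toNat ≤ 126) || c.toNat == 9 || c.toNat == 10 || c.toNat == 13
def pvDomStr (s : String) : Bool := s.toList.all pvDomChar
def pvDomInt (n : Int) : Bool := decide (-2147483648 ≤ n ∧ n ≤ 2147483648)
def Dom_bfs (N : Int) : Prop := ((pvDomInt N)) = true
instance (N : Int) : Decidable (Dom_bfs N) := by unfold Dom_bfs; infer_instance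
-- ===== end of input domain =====

set_option maxRecDepth 100000
set_option maxHeartbeats 2000000


-- B replaces A's breadth-first search over oven times with a closed-form choice
-- between the up-from-0 and the down-from-60 press sequences (objective: simpler).

-- ===== PORT A =====
-- Python's while-loop over the deque, with fuel (400 exceeds the possible number
-- of pops: at most 1 + 5*61 entries are ever enqueued); none = loop exhausted
-- (Python's implicit None), which never happens on any input.
def bfsLoop : Nat → List (Int × Int × Int × Int × Int × Int) → List Int → Int →
    Option (Int × Int × Int × Int × Int)
  | 0, _, _, _ => none
  | _ + 1, [], _, _ => none
  | fuel + 1, (t, a, b, c, d, e) :: q, used, target =>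
    if t = target then some (a, b, c, d, e)
    else if ((PySem.List.pyGet? used t).getD 0) = 0 then
      -- the for-loop over button = 4,3,2,1,0, unrolled in the same order
      bfsLoop fuel
        (q ++ [(min (max (t - 1) 0) 60, a, b, c, d, e + 1),
               (min (max (t + 1) 0) 60, a, b, c, d + 1, e),
               (min (max (t - 10) 0) 60, a, b, c + 1, d, e),
               (min (max (t + 10) 0) 60, a, b + 1, c, d, e),
               (min (max (t + 60) 0) 60, a + 1, b, c, d, e)])
        (used.set t.toNat 1) target
    else bfsLoop fuel q used target

def bfs (N : Int) : Int × Int × Int × Int × Int :=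
  (bfsLoop 400 [(0, PySem.Int.floordiv N 60, 0, 0, 0, 0)]
      (List.replicate 61 0) (PySem.Int.mod N 60)).getD (0, 0, 0, 0, 0)

-- ===== PORT B =====
def bfs_alt (N : Int) : Int × Int × Int × Int × Int :=
  let h := PySem.Int.floordiv N 60
  let r := PySem.Int.mod N 60
  let tt := PySem.Int.floordiv r 10
  let o := PySem.Int.mod r 10
  let up : Int × Int × Int × Int :=
    if o ≤ 5 then (tt, 0, o, 0) else (tt + 1, 0, 0, 10 - o)
  let mt := PySem.Int.floordiv (60 - r) 10
  let p := PySem.Int.mod (60 - r) 10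
  let down : Int × Int × Int × Int :=
    if p ≤ 5 then (0, mt, 0, p) else (0, mt + 1, 10 - p, 0)
  if up.1 + up.2.1 + up.2.2.1 + up.2.2.2 ≤
      1 + (down.1 + down.2.1 + down.2.2.1 + down.2.2.2) then
    (h, up.1, up.2.1, up.2.2.1, up.2.2.2)
  else
    (h + 1, down.1, down.2.1, down.2.2.1, down.2.2.2)

-- ===== PRECONDITION & SPEC =====
def Spec_bfs (N : Int) (out : Int × Int × Int × Int × Int) : Prop := out = bfs_alt N
instance (N : Int) (out : Int × Int × Int × Int × Int) : Decidable (Spec_bfs N out) := by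
  unfold Spec_bfs; infer_instance

-- ===== CLAIM (what is proved, stated in full; the proofs are below) =====
def Claim_equal_bfs : Prop := ∀ (N : Int), Dom_bfs N → Spec_bfs N (bfs N)

-- ===== LEMMAS AND PROOFS =====

/-- Shift the ADDH field of a queue entry. -/
def shiftE (h : Int) : Int × Int × Int × Int × Int × Int → Int × Int × Int × Int × Int × Int
  | (t, a, b, c, d, e) => (t, a + h, b, c, d, e)

/-- Shift the ADDH component of a result. -/
def shiftR (h : Int) : Int × Int × Int × Int × Int → Int × Int × Int × Int × Int
  | (a, b, c, d, e) => (a + h, b, c, d, e)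

/-- The BFS loop commutes with shifting every entry's ADDH field. -/
theorem bfsLoop_shift (h : Int) :
    ∀ (fuel : Nat) (q : List (Int × Int × Int × Int × Int × Int)) (used : List Int)
      (target : Int),
      bfsLoop fuel (q.map (shiftE h)) used target =
        (bfsLoop fuel q used target).map (shiftR h) := by
  intro fuel
  induction fuel with
  | zero => intro q used target; simp [bfsLoop]
  | succ n ih =>
    intro q used target
    cases q with
    | nil => simp [bfsLoop]
    | cons s q =>
      obtain ⟨t, a, b, c, d, e⟩ := s
      simp only [List.map_cons, shiftE, bfsLoop]
      split_ifs with h1 h2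
      · simp [shiftR]
      · rw [← ih]
        refine congrArg (fun l => bfsLoop n l (used.set t.toNat 1) target) ?_
        simp only [List.map_append, List.map_cons, List.map_nil, shiftE,
          List.append_right_inj, List.cons.injEq, Prod.mk.injEq, and_true]
        exact ⟨trivial, trivial, trivial, trivial, trivial, by ring⟩
      · exact ih q used target

/-- On residues 0 ≤ r < 60 with initial ADDH = 0, the BFS returns exactly the
    closed form. Checked by kernel computation over all 60 residues. -/
theorem bfsLoop_base : ∀ n : Nat, n < 60 →
    bfsLoop 400 [(0, 0, 0, 0, 0, 0)] (List.replicate 61 0) (n : Int) =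
      some (bfs_alt (n : Int)) := by
  intro n hn
  interval_cases n <;> decide

theorem alt_shift (hq r N : Int) (h0 : 0 ≤ r) (h60 : r < 60)
    (hh : PySem.Int.floordiv N 60 = hq) (hr : PySem.Int.mod N 60 = r) :
    shiftR hq (bfs_alt r) = bfs_alt N := by
  have hd : PySem.Int.floordiv r 60 = 0 := by
    rw [PySem.Int.floordiv_eq_ediv_of_pos (by norm_num)]
    omega
  have hm : PySem.Int.mod r 60 = r := by
    rw [PySem.Int.mod_eq_emod_of_pos (by norm_num)]
    omega
  simp only [bfs_alt, hd, hm, hh, hr]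
  split_ifs <;> simp [shiftR] <;> ring

theorem bfs_eq (N : Int) : bfs N = bfs_alt N := by
  set hq := PySem.Int.floordiv N 60 with hhq
  set r := PySem.Int.mod N 60 with hhr
  have hre : r = N % 60 := PySem.Int.mod_eq_emod_of_pos (by norm_num)
  have h0 : 0 ≤ r := by rw [hre]; exact Int.emod_nonneg N (by norm_num)
  have h60 : r < 60 := by rw [hre]; exact Int.emod_lt_of_pos N (by norm_num)
  have hn : r = ((r.toNat : Nat) : Int) := (Int.toNat_of_nonneg h0).symm
  have hnlt : r.toNat < 60 := by omega
  have hinit : [((0 : Int), hq, (0 : Int), (0 : Int), (0 : Int), (0 : Int))] =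
      List.map (shiftE hq) [(0, 0, 0, 0, 0, 0)] := by simp [shiftE]
  unfold bfs
  rw [← hhq, ← hhr, hinit, bfsLoop_shift, hn, bfsLoop_base r.toNat hnlt]
  simp only [Option.map_some, Option.getD_some]
  exact alt_shift hq r N h0 h60 hhq.symm hhr.symm ▸ (by rw [← hn])

-- ===== VERDICT (by name: the statement is the Claim_ definition above) =====
theorem bfs_spec : Claim_equal_bfs := by
  intro N _
  unfold Spec_bfs
  exact bfs_eq N
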